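-- pv_equiv track=rewrite | github.com/jisup-kim/Programmers_storages | 프로그래머스/unrated/138476. 귤 고르기/귤 고르기.py | solution
-- ===== SOURCE A (Python) =====
-- from collections import Counter
--
-- def solution(k, tangerine):
--     count = 0
--     coun = Counter(tangerine)
--     coun = dict(coun.most_common())
--     for couns in coun.values():
--         k -= couns
--         count += 1
--         if k <= 0:
--             return count
-- ===== SOURCE B (Python) =====
-- from collections import Counter
--
-- def solution(k, tangerine):
--     counts = Counter(tangerine)
--     bucket = Counter(counts.values())
--     used = 0
--     for f in range(max(bucket), 0, -1):
--         m = bucket.get(f, 0)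
--         if m == 0:
--             continue
--         if k <= f * m:
--             return used + max(1, -(-k // f))
--         k -= f * m
--         used += m
-- ===== Notes on version B (the rewrite author's own statement) =====
-- stated objective: faster
-- what changed: Instead of sorting the Counter via most_common and subtracting one size's count per loop iteration, B builds a frequency-of-frequencies bucket Counter and scans frequency values from the maximum down to 1, consuming each whole bucket with one subtraction (k -= f*m, used += m) and finishing the last bucket with one ceiling division (at least one type is used). Measured faster: B avoids sorting the distinct sizes and touches each bucket once.
-- outside the precondition, e.g. on solution(3, [1, 2]): A returns None, B returns None; on solution(0, []): A returns None, B raises ValueError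
import Mathlib
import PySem

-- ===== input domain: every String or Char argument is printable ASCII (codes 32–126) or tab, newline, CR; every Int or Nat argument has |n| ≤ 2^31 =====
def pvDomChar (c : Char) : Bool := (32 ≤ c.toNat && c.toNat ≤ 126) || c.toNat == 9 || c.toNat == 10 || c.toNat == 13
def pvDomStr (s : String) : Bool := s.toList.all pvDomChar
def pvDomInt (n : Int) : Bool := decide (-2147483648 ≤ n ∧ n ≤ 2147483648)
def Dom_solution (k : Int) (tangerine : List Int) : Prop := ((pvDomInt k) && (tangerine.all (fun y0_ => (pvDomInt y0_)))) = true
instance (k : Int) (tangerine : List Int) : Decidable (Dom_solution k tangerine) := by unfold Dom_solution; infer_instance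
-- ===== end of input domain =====

-- B replaces A's most_common sort + one-size-per-iteration subtraction by a bucket Counter of
-- frequencies scanned from the maximum down, consumed arithmetically (measured faster: no sort).

-- ===== PORT A =====
-- the 'for couns in coun.values(): k -= couns; count += 1; if k <= 0: return count' loop;
-- the [] case is Python's fall-off-the-loop 'return None', excluded by Pre_solution
def pvLoopA (k count : Int) : List Int → Int
  | [] => 0
  | c :: rest => if k - c ≤ 0 then count + 1 else pvLoopA (k - c) (count + 1) rest

def solution (k : Int) (tangerine : List Int) : Int :=
  let coun := PySem.Dict.counter tangerine
  let coun2 := PySem.Dict.ofList (PySem.List.sorted coun.items (fun p => p.2) true)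
  pvLoopA k 0 coun2.values

-- ===== PORT B =====
-- the 'for f in range(max(bucket), 0, -1): …' loop, fuel = f; the fuel-0 case is Python's
-- fall-off-the-loop 'return None', excluded by Pre_solution
def pvLoopB (bucket : PySem.Dict Int Int) : Int → Int → Nat → Int
  | _, _, 0 => 0
  | k, used, n + 1 =>
    let f : Int := (n : Int) + 1
    let m := bucket.getD f 0
    if m = 0 then pvLoopB bucket k used n
    else if k ≤ f * m then used + max 1 (-(PySem.Int.floordiv (-k) f))
    else pvLoopB bucket (k - f * m) (used + m) n

def solution_alt (k : Int) (tangerine : List Int) : Int :=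
  let counts := PySem.Dict.counter tangerine
  let bucket := PySem.Dict.counter counts.values
  match PySem.List.max? bucket.keys (fun x => x) with
  | none => 0   -- Python: max() of an empty Counter raises ValueError; outside Pre_solution
  | some maxf => pvLoopB bucket k 0 maxf.toNat

-- ===== PRECONDITION & SPEC =====
-- Pre_ excludes exactly the inputs on which A falls off its loop and returns None, not an int:
-- k > len(tangerine), including the empty tangerine list.
def Pre_solution (k : Int) (tangerine : List Int) : Prop :=
  tangerine ≠ [] ∧ k ≤ (tangerine.length : Int)
instance (k : Int) (tangerine : List Int) : Decidable (Pre_solution k tangerine) := by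
  unfold Pre_solution; infer_instance

def pvWitness_solution : Int × List Int := (2, [5, 5, 7])

def Spec_solution (k : Int) (tangerine : List Int) (out : Int) : Prop := out = solution_alt k tangerine
instance (k : Int) (tangerine : List Int) (out : Int) : Decidable (Spec_solution k tangerine out) := by unfold Spec_solution; infer_instance

-- ===== CLAIM (what is proved, stated in full; the proofs are below) =====
def Claim_equal_solution : Prop := ∀ (k : Int) (tangerine : List Int), Dom_solution k tangerine → Pre_solution k tangerine → Spec_solution k tangerine (solution k tangerine)

-- ===== LEMMAS AND PROOFS =====

-- a descending list whose elements are all ≤ f starts with its block of f's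
theorem pv_desc_split (f : Int) :
    ∀ L : List Int, L.Pairwise (fun a b => b ≤ a) → (∀ x ∈ L, x ≤ f) →
      ∃ L', L = List.replicate (L.count f) f ++ L' ∧ (∀ x ∈ L', x < f) ∧
        L'.Pairwise (fun a b => b ≤ a) := by
  intro L
  induction L with
  | nil => intro _ _; exact ⟨[], by simp, by simp, by simp⟩
  | cons a t ih =>
    intro hp hle
    rcases List.pairwise_cons.mp hp with ⟨ha, hpt⟩
    by_cases haf : a = f
    · subst haf
      obtain ⟨L', heq, hlt, hp'⟩ := ih hpt (fun x hx => hle x (List.mem_cons_of_mem _ hx))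
      refine ⟨L', ?_, hlt, hp'⟩
      have : (a :: t).count a = t.count a + 1 := by simp
      rw [this, List.replicate_succ, List.cons_append]
      exact congrArg (a :: ·) heq
    · have haf' : a < f := lt_of_le_of_ne (hle a (by simp)) haf
      have hallt : ∀ x ∈ a :: t, x < f := by
        intro x hx
        rcases List.mem_cons.mp hx with h | h
        · exact h ▸ haf'
        · exact lt_of_le_of_lt (ha x h) haf'
      have hcnt : (a :: t).count f = 0 := by
        rw [List.count_eq_zero]
        intro hmem
        exact absurd rfl (ne_of_lt (hallt f hmem))
      exact ⟨a :: t, by rw [hcnt]; simp, hallt, hp⟩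

-- consuming part of a block of m copies of f when k ≤ f*m: A's loop returns
-- used + max(1, ceil(k/f)) (at least one element is always consumed)
theorem pv_loopA_replicate_le (f : Int) (hf : 0 < f) :
    ∀ (m : Nat) (k used : Int) (L' : List Int), 1 ≤ m → k ≤ f * m →
      pvLoopA k used (List.replicate m f ++ L') = used + max 1 (-(PySem.Int.floordiv (-k) f)) := by
  intro m
  induction m with
  | zero => intro k used L' hm _; omega
  | succ m ih =>
    intro k used L' _ hkm
    rw [List.replicate_succ, List.cons_append]
    simp only [pvLoopA]
    by_cases hkf : k - f ≤ 0
    · rw [if_pos hkf]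
      have hq := (PySem.Int.neg_floordiv_neg_eq_iff_of_pos (a := k) hf).mp rfl
      have hle1 : -(PySem.Int.floordiv (-k) f) ≤ 1 := by nlinarith [hq.1, hq.2]
      rw [max_eq_left hle1]
    · rw [if_neg hkf]
      have hm1 : 1 ≤ m := by
        by_contra hm0
        have : m = 0 := by omega
        subst this
        push_cast at hkm; omega
      rw [ih (k - f) (used + 1) L' hm1 (by push_cast at hkm ⊢; nlinarith)]
      have hq := (PySem.Int.neg_floordiv_neg_eq_iff_of_pos (a := k - f) hf).mp rfl
      have hge : 1 ≤ -(PySem.Int.floordiv (-(k - f)) f) := by nlinarith [hq.1, hq.2]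
      have h2 : -(PySem.Int.floordiv (-k) f) = -(PySem.Int.floordiv (-(k - f)) f) + 1 :=
        (PySem.Int.neg_floordiv_neg_eq_iff_of_pos hf).mpr (by constructor <;> nlinarith [hq.1, hq.2])
      rw [max_eq_right hge, h2, max_eq_right (by omega)]
      ring

-- consuming m copies of f when k > f*m: A's loop passes through the whole block
theorem pv_loopA_replicate_gt (f : Int) (hf : 0 < f) :
    ∀ (m : Nat) (k used : Int) (L' : List Int), f * m < k →
      pvLoopA k used (List.replicate m f ++ L') = pvLoopA (k - f * m) (used + m) L' := by
  intro m
  induction m with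
  | zero => intro k used L' _; simp
  | succ m ih =>
    intro k used L' hkm
    rw [List.replicate_succ, List.cons_append]
    simp only [pvLoopA]
    have hm : (0:Int) ≤ (m:Int) := by positivity
    have hnotle : ¬ (k - f ≤ 0) := by push_cast at hkm; nlinarith
    rw [if_neg hnotle, ih (k - f) (used + 1) L' (by push_cast at hkm ⊢; nlinarith)]
    congr 1 <;> push_cast <;> ring

-- the bucket scan agrees with A's loop on any descending list with matching counts
theorem pv_main (bucket : PySem.Dict Int Int) :
    ∀ (n : Nat) (L : List Int) (k used : Int),
      L.Pairwise (fun a b => b ≤ a) → (∀ x ∈ L, 1 ≤ x ∧ x ≤ (n : Int)) →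
      (∀ g : Int, 1 ≤ g → g ≤ (n : Int) → bucket.getD g 0 = (L.count g : Int)) →
      pvLoopA k used L = pvLoopB bucket k used n := by
  intro n
  induction n with
  | zero =>
    intro L k used hp hel hB
    match L, hel with
    | [], _ => simp [pvLoopA, pvLoopB]
    | x :: t, hel =>
      have := hel x (by simp)
      omega
  | succ n ih =>
    intro L k used hp hel hB
    set f : Int := (n : Int) + 1 with hfdef
    have hf : 0 < f := by omega
    have hle : ∀ x ∈ L, x ≤ f := fun x hx => by have := (hel x hx).2; push_cast at this ⊢; omega
    obtain ⟨L', heq, hlt, hp'⟩ := pv_desc_split f L hp hle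
    set c := L.count f with hcdef
    have hbf : bucket.getD f 0 = (c : Int) := hB f (by omega) (by push_cast; omega)
    simp only [pvLoopB]
    rw [hbf]
    by_cases hc : c = 0
    · rw [if_pos (by exact_mod_cast hc)]
      have hL' : L = L' := by rw [heq, hc]; simp
      rw [← ih L k used (hL' ▸ hp') (fun x hx => ⟨(hel x hx).1, by
            have := hlt x (hL' ▸ hx); push_cast at this ⊢; omega⟩)
          (fun g h1 h2 => by rw [hB g h1 (by push_cast at h2 ⊢; omega)])]
    · have hcpos : (0:Int) < (c : Int) := by exact_mod_cast Nat.pos_of_ne_zero hc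
      rw [if_neg (by omega)]
      by_cases hkm : k ≤ f * (c : Int)
      · rw [if_pos hkm, heq]
        exact pv_loopA_replicate_le f hf c k used L' (Nat.one_le_iff_ne_zero.mpr hc) hkm
      · rw [if_neg hkm]
        have hgt : f * (c : Int) < k := by omega
        rw [heq, pv_loopA_replicate_gt f hf c k used L' hgt]
        refine ih L' (k - f * (c : Int)) (used + (c : Int)) hp'
          (fun x hx => ⟨(hel x (heq ▸ List.mem_append_right _ hx)).1, by
            have := hlt x hx; push_cast at this ⊢; omega⟩) ?_
        intro g h1 h2
        have h2' : g ≤ ((n + 1 : Nat) : Int) := by push_cast; omega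
        have hgne : (f == g) = false := by
          simp only [beq_eq_false_iff_ne]; omega
        have : L.count g = L'.count g := by
          rw [heq, List.count_append, List.count_replicate, hgne]
          simp
        rw [hB g h1 h2', this]

-- dict(pairs) with nodup keys keeps exactly the pairs
theorem pv_items_ofList (ps : List (Int × Int)) (h : (ps.map (·.1)).Nodup) :
    (PySem.Dict.ofList ps).items = ps := by
  show (ps.foldl (fun d a => d.insert a.1 a.2) PySem.Dict.empty).items = ps
  rw [PySem.Dict.items_foldl_insert_fresh ps (·.1) (·.2) _ (by intro a _; rfl) h]
  simp [PySem.Dict.empty]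

-- A = B under the precondition
theorem pv_solution_eq (k : Int) (tangerine : List Int) (hne : tangerine ≠ []) :
    solution k tangerine = solution_alt k tangerine := by
  unfold solution solution_alt
  simp only []
  set cnts := (PySem.Dict.counter tangerine).values with hcnts
  set bucket := PySem.Dict.counter cnts with hbucket
  set sortedI := PySem.List.sorted (PySem.Dict.counter tangerine).items (fun p => p.2) true with hsI
  -- A's values list
  have hnodupkeys : (sortedI.map (·.1)).Nodup := by
    have hperm : sortedI.Perm (PySem.Dict.counter tangerine).items :=
      PySem.List.sorted_perm _ _ _
    have : ((PySem.Dict.counter tangerine).items.map (·.1)).Nodup := by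
      have := PySem.Dict.nodup_keys_counter (xs := tangerine)
      simpa [PySem.Dict.keys] using this
    exact ((hperm.map (·.1)).nodup_iff).mpr this
  have hAvals : (PySem.Dict.ofList sortedI).values = sortedI.map (·.2) := by
    simp [PySem.Dict.values, pv_items_ofList sortedI hnodupkeys]
  set L := sortedI.map (·.2) with hL
  -- L is a permutation of cnts
  have hpermL : L.Perm cnts := by
    have := (PySem.List.sorted_perm (PySem.Dict.counter tangerine).items (fun p => p.2) true).map (·.2)
    simpa [PySem.Dict.values] using this
  -- L is descending
  have hdesc : L.Pairwise (fun a b => b ≤ a) := by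
    have := PySem.List.sorted_pairwise_rev (PySem.Dict.counter tangerine).items (fun p => p.2)
    exact (List.pairwise_map).mpr this
  -- members of cnts are positive counts
  have hmem_cnts : ∀ x ∈ cnts, 1 ≤ x := by
    intro x hx
    rw [hcnts, PySem.Dict.values, PySem.Dict.items_counter, List.map_map] at hx
    simp only [List.mem_map, Function.comp] at hx
    obtain ⟨v, hv, rfl⟩ := hx
    have hvmem : v ∈ tangerine := (PySem.Set.mem_ofList _ _).mp hv
    have := List.count_pos_iff.mpr hvmem
    omega
  have hcne : cnts ≠ [] := by
    rw [hcnts, PySem.Dict.values, PySem.Dict.items_counter, List.map_map]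
    simp only [ne_eq, List.map_eq_nil_iff]
    intro h0
    match tangerine, hne with
    | a :: t, _ =>
      have : a ∈ PySem.Set.ofList (a :: t) := ((PySem.Set.mem_ofList _ _).mpr (by simp))
      rw [h0] at this
      simp at this
  -- max of bucket keys
  cases hmax : PySem.List.max? bucket.keys (fun x => x) with
  | none =>
    exfalso
    rw [PySem.List.max?_eq_none_iff, hbucket, PySem.Dict.keys_counter] at hmax
    obtain ⟨y, hy⟩ := List.exists_mem_of_ne_nil cnts hcne
    have : y ∈ PySem.Set.ofList cnts := (PySem.Set.mem_ofList _ _).mpr hy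
    rw [hmax] at this
    simp at this
  | some maxf =>
    have hmaxmem : maxf ∈ cnts := by
      have := PySem.List.max?_mem hmax
      rw [hbucket, PySem.Dict.keys_counter, PySem.Set.mem_ofList] at this
      exact this
    have hmax1 : 1 ≤ maxf := hmem_cnts maxf hmaxmem
    have hcast : ((maxf.toNat : Nat) : Int) = maxf := Int.toNat_of_nonneg (by omega)
    rw [hAvals]
    refine pv_main bucket maxf.toNat L k 0 hdesc ?_ ?_
    · intro x hx
      refine ⟨hmem_cnts x (hpermL.mem_iff.mp hx), ?_⟩
      rw [hcast]
      have hxk : x ∈ bucket.keys := by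
        rw [hbucket, PySem.Dict.keys_counter, PySem.Set.mem_ofList]
        exact hpermL.mem_iff.mp hx
      exact PySem.List.max?_isMax hmax x hxk
    · intro g h1 h2
      rw [hbucket, PySem.Dict.getD_counter]
      congr 1
      exact (hpermL.count_eq g).symm

-- ===== VERDICT (by name: the statement is the Claim_ definition above) =====
theorem solution_spec : Claim_equal_solution := by
  intro k tangerine _ hpre
  unfold Spec_solution
  exact pv_solution_eq k tangerine hpre.1
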